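-- pv_equiv track=rewrite | github.com/2025-II-Infra-ADAII/proyecto-i-ada-ii-funcionaperonocompila-e | tests/test_voraz.py | _fuerza_bruta_optimo
-- ===== SOURCE A (Python) =====
-- def _recalcular_costo(finca, perm):
--     n = len(finca)
--     start = [0] * n
--     t = 0
--     for i in perm:
--         start[i] = t
--         t += finca[i][1]  # tr
--
--     costo = 0
--     for i, (ts, tr, p) in enumerate(finca):
--         C = start[i] + tr
--         R = C - ts
--         if R < 0:
--             R = 0
--         costo += p * R
--     return costo
--
-- def _fuerza_bruta_optimo(finca):
--     from itertools import permutations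
--     mejor = None
--     mejor_pi = None
--     idxs = list(range(len(finca)))
--     for pi in permutations(idxs):
--         c = _recalcular_costo(finca, pi)
--         if mejor is None or c < mejor:
--             mejor = c
--             mejor_pi = pi
--     return mejor, list(mejor_pi)
-- ===== SOURCE B (Python) =====
-- def _fuerza_bruta_optimo(finca):
--     # Memoized DP over the set of still-unscheduled jobs (the start time is
--     # determined by that set), choosing the smallest index first on ties, so
--     # the returned order is the lexicographically smallest optimal one.
--     n = len(finca)
--     memo = {}
--
--     def solve(rem, t):
--         if not rem:
--             return (0, [])
--         if rem in memo:
--             return memo[rem]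
--         best = None
--         for i in rem:
--             ts, tr, p = finca[i]
--             r = t + tr - ts
--             pen = p * r if r > 0 else 0
--             sub_c, sub_p = solve(tuple(j for j in rem if j != i), t + tr)
--             c = pen + sub_c
--             if best is None or c < best[0]:
--                 best = (c, [i] + sub_p)
--         memo[rem] = best
--         return best
--
--     c, perm = solve(tuple(range(n)), 0)
--     return c, perm
-- ===== Notes on version B (the rewrite author's own statement) =====
-- stated objective: faster
-- what changed: A enumerates all n! permutations and recomputes each schedule's cost from scratch; B is a memoized dynamic program over sets of still-unscheduled jobs (the start time is determined by the set), picking the smallest index first so it reconstructs the same lexicographically smallest optimal order.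
import Mathlib
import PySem

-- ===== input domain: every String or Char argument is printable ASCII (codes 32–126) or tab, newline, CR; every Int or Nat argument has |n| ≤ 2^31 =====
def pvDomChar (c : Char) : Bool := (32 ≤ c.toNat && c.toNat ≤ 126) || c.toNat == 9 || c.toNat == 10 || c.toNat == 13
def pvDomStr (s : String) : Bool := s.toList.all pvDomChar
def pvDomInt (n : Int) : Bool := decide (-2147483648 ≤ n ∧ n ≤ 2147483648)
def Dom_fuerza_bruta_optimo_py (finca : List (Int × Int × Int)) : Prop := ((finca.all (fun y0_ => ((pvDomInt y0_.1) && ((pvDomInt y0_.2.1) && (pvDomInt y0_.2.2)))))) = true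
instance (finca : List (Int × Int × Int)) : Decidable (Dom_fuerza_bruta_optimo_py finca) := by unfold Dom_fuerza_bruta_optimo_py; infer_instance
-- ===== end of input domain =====

-- B replaces A's O(n!·n) scan over all permutations by a memoized subset DP
-- (the start time is determined by the set of already-scheduled jobs),
-- reconstructing the same lexicographically smallest optimal order; faster.

-- ===== PORT A =====
-- itertools.permutations of a list, in the lexicographic-by-position order it emits
def pvPermsLex (l : List Nat) : List (List Nat) :=
  if h : l = [] then [[]]
  else l.attach.flatMap (fun x => (pvPermsLex (l.erase x.1)).map (x.1 :: ·))
termination_by l.length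
decreasing_by
  have hm := x.2
  have := List.length_erase_of_mem hm
  have : 0 < l.length := List.length_pos_of_mem hm
  simp [List.length_erase_of_mem hm]
  omega

-- _recalcular_costo, step for step (indices produced by pvPermsLex are always in range)
def pvRecalcCost (finca : List (Int × Int × Int)) (perm : List Nat) : Int :=
  let n := finca.length
  let st := perm.foldl
    (fun (st : List Int × Int) i =>
      (st.1.set i st.2, st.2 + (finca.getD i (0, 0, 0)).2.1))
    (List.replicate n (0 : Int), 0)
  let start := st.1
  finca.zipIdx.foldl
    (fun costo fi =>
      let C := start.getD fi.2 0 + fi.1.2.1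
      let R := C - fi.1.1
      let R := if R < 0 then 0 else R
      costo + fi.1.2.2 * R)
    0

def fuerza_bruta_optimo_py (finca : List (Int × Int × Int)) : Int × List Int :=
  let idxs := List.range finca.length
  match (pvPermsLex idxs).foldl
      (fun (best : Option (Int × List Nat)) pi =>
        let c := pvRecalcCost finca pi
        match best with
        | none => some (c, pi)
        | some b => if c < b.1 then some (c, pi) else some b)
      none with
  | some b => (b.1, b.2.map (Int.ofNat ·))
  | none => (0, [])   -- unreachable: pvPermsLex never returns []

-- ===== PORT B =====
-- Source B's solve(rem, t); the Python memo cache is a pure optimisation and is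
-- omitted (the computed value is identical).
def pvSolveB (finca : List (Int × Int × Int)) (rem : List Nat) (t : Int) : Int × List Nat :=
  if h : rem = [] then (0, [])
  else
    match rem.attach.foldl
        (fun (best : Option (Int × List Nat)) (i : {x // x ∈ rem}) =>
          let f := finca.getD i.1 (0, 0, 0)
          let r := t + f.2.1 - f.1
          let pen := if r > 0 then f.2.2 * r else 0
          let sub := pvSolveB finca (rem.filter (fun j => j ≠ i.1)) (t + f.2.1)
          let c := pen + sub.1
          match best with
          | none => some (c, i.1 :: sub.2)
          | some b => if c < b.1 then some (c, i.1 :: sub.2) else some b)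
        none with
    | some b => b
    | none => (0, [])   -- unreachable: rem ≠ []
termination_by rem.length
decreasing_by
  have h2 : (List.filter (fun x : {y // y ∈ rem} => decide ((x : Nat) ≠ (i : Nat))) rem.attach).length < rem.attach.length :=
    List.length_filter_lt_length_iff_exists.mpr ⟨i, List.mem_attach _ _, by simp⟩
  simp only [List.length_unattach]
  simpa only [List.length_attach] using h2

def fuerza_bruta_optimo_py_alt (finca : List (Int × Int × Int)) : Int × List Int :=
  let r := pvSolveB finca (List.range finca.length) 0
  (r.1, r.2.map (Int.ofNat ·))

-- ===== PRECONDITION & SPEC =====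
def Spec_fuerza_bruta_optimo_py (finca : List (Int × Int × Int)) (out : Int × List Int) : Prop := out = fuerza_bruta_optimo_py_alt finca
instance (finca : List (Int × Int × Int)) (out : Int × List Int) : Decidable (Spec_fuerza_bruta_optimo_py finca out) := by unfold Spec_fuerza_bruta_optimo_py; infer_instance

-- ===== CLAIM (what is proved, stated in full; the proofs are below) =====
def Claim_equal_fuerza_bruta_optimo_py : Prop := ∀ (finca : List (Int × Int × Int)), Dom_fuerza_bruta_optimo_py finca → Spec_fuerza_bruta_optimo_py finca (fuerza_bruta_optimo_py finca)

-- ===== LEMMAS AND PROOFS =====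

-- duration of job i
def pvDur (finca : List (Int × Int × Int)) (i : Nat) : Int := (finca.getD i (0, 0, 0)).2.1

-- A's per-job cost term, as A computes it from a start time s
def pvTm (f : Int × Int × Int) (s : Int) : Int :=
  f.2.2 * (if s + f.2.1 - f.1 < 0 then 0 else s + f.2.1 - f.1)

-- B's per-job penalty of job i started at time t
def pvPen (finca : List (Int × Int × Int)) (i : Nat) (t : Int) : Int :=
  let f := finca.getD i (0, 0, 0)
  if t + f.2.1 - f.1 > 0 then f.2.2 * (t + f.2.1 - f.1) else 0

-- cost of a schedule read off sequentially (B's decomposition)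
def pvSeqCost (finca : List (Int × Int × Int)) : List Nat → Int → Int
  | [], _ => 0
  | i :: rest, t => pvPen finca i t + pvSeqCost finca rest (t + pvDur finca i)

-- the 'keep the first strict minimum' accumulator step shared by both folds
def pvStep (acc : Option (Int × List Nat)) (c : Int × List Nat) : Option (Int × List Nat) :=
  match acc with
  | none => some c
  | some b => if c.1 < b.1 then some c else some b

def pvUpd (b c : Int × List Nat) : Int × List Nat := if c.1 < b.1 then c else b

def pvShift (c0 : Int) (x : Nat) (p : Int × List Nat) : Int × List Nat := (c0 + p.1, x :: p.2)

theorem pvPen_eq_tm (finca : List (Int × Int × Int)) (i : Nat) (t : Int) :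
    pvPen finca i t = pvTm (finca.getD i (0, 0, 0)) t := by
  simp only [pvPen, pvTm]
  split_ifs with h1 h2 h2
  · exfalso; omega
  · rfl
  · exact (mul_zero _).symm
  · have hz : t + (finca.getD i (0, 0, 0)).2.1 - (finca.getD i (0, 0, 0)).1 = 0 := by omega
    rw [hz, mul_zero]

theorem pvStep_some (b c : Int × List Nat) : pvStep (some b) c = some (pvUpd b c) := by
  unfold pvStep pvUpd
  by_cases h : c.1 < b.1 <;> simp [h]

theorem pvUpd_assoc (b x c : Int × List Nat) : pvUpd (pvUpd b x) c = pvUpd b (pvUpd x c) := by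
  unfold pvUpd
  split_ifs <;> first | rfl | (exfalso; omega)

theorem pvUpd_shift (c0 : Int) (x : Nat) (b c : Int × List Nat) :
    pvUpd (pvShift c0 x b) (pvShift c0 x c) = pvShift c0 x (pvUpd b c) := by
  unfold pvUpd pvShift
  split_ifs <;> first | rfl | (exfalso; omega)

theorem foldl_pvStep_some : ∀ (l : List (Int × List Nat)) (b : Int × List Nat),
    l.foldl pvStep (some b) = some ((l.foldl pvStep none).elim b (pvUpd b)) := by
  intro l
  induction l with
  | nil => intro b; rfl
  | cons x l ih =>
    intro b
    simp only [List.foldl_cons, pvStep_some, show ∀ c, pvStep none c = some c from fun _ => rfl]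
    rw [ih (pvUpd b x), ih x]
    cases hl : l.foldl pvStep none with
    | none => simp
    | some c => simp [pvUpd_assoc]

theorem foldl_pvStep_map_shift (c0 : Int) (x : Nat) :
    ∀ (l : List (Int × List Nat)) (acc : Option (Int × List Nat)),
    (l.map (pvShift c0 x)).foldl pvStep (acc.map (pvShift c0 x))
      = (l.foldl pvStep acc).map (pvShift c0 x) := by
  intro l
  induction l with
  | nil => intro acc; simp
  | cons y l ih =>
    intro acc
    simp only [List.map_cons, List.foldl_cons]
    have hstep : pvStep (acc.map (pvShift c0 x)) (pvShift c0 x y) = (pvStep acc y).map (pvShift c0 x) := by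
      cases acc with
      | none => rfl
      | some b => simp only [Option.map_some, pvStep_some, pvUpd_shift]
    rw [hstep, ih]

theorem foldl_pvStep_isSome (l : List (Int × List Nat)) (hl : l ≠ []) :
    ∃ w, l.foldl pvStep none = some w := by
  cases l with
  | nil => exact absurd rfl hl
  | cons x l =>
    simp only [List.foldl_cons, show pvStep none x = some x from rfl]
    rw [foldl_pvStep_some]
    exact ⟨_, rfl⟩

theorem pv_foldl_flatMap {α β γ : Type} (L : List α) (g : α → List β) (f : γ → β → γ) :
    ∀ (init : γ), (L.flatMap g).foldl f init = L.foldl (fun acc x => (g x).foldl f acc) init := by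
  induction L with
  | nil => intro init; rfl
  | cons x L ih =>
    intro init
    simp only [List.flatMap_cons, List.foldl_append, List.foldl_cons, ih]

theorem pv_foldl_congr {α β : Type} (l : List α) (f g : β → α → β) (b : β)
    (h : ∀ acc, ∀ x ∈ l, f acc x = g acc x) : l.foldl f b = l.foldl g b := by
  induction l generalizing b with
  | nil => rfl
  | cons x l ih =>
    simp only [List.foldl_cons]
    rw [h b x (List.mem_cons_self), ih _ (fun acc y hy => h acc y (List.mem_cons_of_mem _ hy))]

theorem mem_pvPermsLex : ∀ (l pi : List Nat), pi ∈ pvPermsLex l → pi.Perm l := by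
  intro l
  induction hn : l.length using Nat.strong_induction_on generalizing l with
  | _ n ih =>
    intro pi h
    by_cases hl : l = []
    · subst hl
      rw [pvPermsLex, dif_pos rfl] at h
      simp only [List.mem_singleton] at h
      subst h
      exact List.Perm.refl _
    · rw [pvPermsLex, dif_neg hl] at h
      simp only [List.mem_flatMap, List.mem_map, List.mem_attach, true_and] at h
      obtain ⟨x, q, hq, rfl⟩ := h
      have hx := x.2
      have hlen : (l.erase x.1).length < n := by
        rw [List.length_erase_of_mem hx]
        have : 0 < l.length := List.length_pos_of_mem hx
        omega
      subst hn
      have hq' : q.Perm (l.erase x.1) := ih _ hlen (l.erase x.1) rfl q hq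
      exact (hq'.cons x.1).trans (List.perm_cons_erase hx).symm

-- the start-array builder of _recalcular_costo's first loop
def pvBuild (finca : List (Int × Int × Int)) : List Nat → List Int → Int → List Int
  | [], arr, _ => arr
  | i :: rest, arr, t => pvBuild finca rest (arr.set i t) (t + pvDur finca i)

theorem pvBuild_eq_fold (finca : List (Int × Int × Int)) :
    ∀ (perm : List Nat) (arr : List Int) (t : Int),
    (perm.foldl (fun (st : List Int × Int) i =>
        (st.1.set i st.2, st.2 + (finca.getD i (0, 0, 0)).2.1)) (arr, t)).1
      = pvBuild finca perm arr t := by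
  intro perm
  induction perm with
  | nil => intro arr t; rfl
  | cons i rest ih => intro arr t; exact ih (arr.set i t) _



def pvCostSum (finca : List (Int × Int × Int)) (arr : List Int) : Int :=
  ((List.range finca.length).map (fun j => pvTm (finca.getD j (0, 0, 0)) (arr.getD j 0))).sum

theorem pv_foldl_add_sum {α : Type} (g : α → Int) :
    ∀ (l : List α) (a : Int), l.foldl (fun c x => c + g x) a = a + (l.map g).sum := by
  intro l
  induction l with
  | nil => intro a; simp
  | cons x l ih => intro a; simp only [List.foldl_cons, List.map_cons, List.sum_cons, ih]; omega

theorem pv_zipIdx_eq (l : List (Int × Int × Int)) :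
    l.zipIdx = (List.range l.length).map (fun j => (l.getD j (0, 0, 0), j)) := by
  apply List.ext_getElem
  · simp
  · intro i h1 h2
    simp only [List.getElem_zipIdx, List.getElem_map, List.getElem_range]
    rw [List.getD_eq_getElem]
    · simp
    · simpa using h2

theorem pv_sum_map_add {α : Type} (l : List α) (f g : α → Int) :
    (l.map (fun x => f x + g x)).sum = (l.map f).sum + (l.map g).sum := by
  induction l with
  | nil => simp
  | cons x l ih => simp only [List.map_cons, List.sum_cons, ih]; ring

theorem pv_sum_indicator (c : Int) : ∀ (n x : Nat), x < n →
    ((List.range n).map (fun j => if j = x then c else 0)).sum = c := by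
  intro n
  induction n with
  | zero => intro x hx; omega
  | succ n ih =>
    intro x hx
    rw [List.range_succ]
    simp only [List.map_append, List.sum_append, List.map_cons, List.map_nil, List.sum_cons,
      List.sum_nil]
    by_cases h : x = n
    · subst h
      have hz : ((List.range x).map (fun j => if j = x then c else 0)).sum = 0 := by
        apply List.sum_eq_zero
        intro y hy
        simp only [List.mem_map, List.mem_range] at hy
        obtain ⟨j, hj, rfl⟩ := hy
        simp [show j ≠ x by omega]
      simp [hz]
    · rw [ih x (by omega)]
      simp [show ¬ (n = x) by omega]

theorem pvBuild_cost (finca : List (Int × Int × Int)) :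
    ∀ (perm : List Nat) (arr : List Int) (t : Int),
    perm.Nodup → (∀ i ∈ perm, i < finca.length) → arr.length = finca.length →
    pvCostSum finca (pvBuild finca perm arr t)
      = pvSeqCost finca perm t
        + ((List.range finca.length).map
            (fun j => if j ∈ perm then 0 else pvTm (finca.getD j (0, 0, 0)) (arr.getD j 0))).sum := by
  intro perm
  induction perm with
  | nil =>
    intro arr t _ _ _
    simp [pvBuild, pvSeqCost, pvCostSum]
  | cons x rest ih =>
    intro arr t hnd hub hlen
    have hxn : x < finca.length := hub x List.mem_cons_self
    have hxr : x ∉ rest := (List.nodup_cons.mp hnd).1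
    rw [pvBuild, ih (arr.set x t) (t + pvDur finca x) (List.nodup_cons.mp hnd).2
        (fun i hi => hub i (List.mem_cons_of_mem _ hi)) (by rw [List.length_set]; exact hlen)]
    rw [pvSeqCost]
    have hpt : ∀ j ∈ List.range finca.length,
        (if j ∈ rest then 0 else pvTm (finca.getD j (0, 0, 0)) ((arr.set x t).getD j 0))
          = (if j = x then pvPen finca x t else 0)
            + (if j ∈ x :: rest then 0 else pvTm (finca.getD j (0, 0, 0)) (arr.getD j 0)) := by
      intro j hj
      by_cases hjx : j = x
      · subst hjx
        have hset : (arr.set j t).getD j 0 = t := by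
          rw [List.getD_eq_getElem?_getD, List.getElem?_set_self (by omega)]
          rfl
        rw [if_neg hxr, if_pos rfl, if_pos List.mem_cons_self, hset, pvPen_eq_tm, add_zero]
      · have hset : (arr.set x t).getD j 0 = arr.getD j 0 := by
          rw [List.getD_eq_getElem?_getD, List.getElem?_set_ne (fun h => hjx h.symm),
            ← List.getD_eq_getElem?_getD]
        rw [hset]
        simp [List.mem_cons, hjx]
    rw [List.map_congr_left hpt, pv_sum_map_add, pv_sum_indicator _ _ _ hxn]
    ring

theorem pvRecalc_eq_seq (finca : List (Int × Int × Int)) (perm : List Nat)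
    (hp : perm.Perm (List.range finca.length)) :
    pvRecalcCost finca perm = pvSeqCost finca perm 0 := by
  have hnd : perm.Nodup := hp.symm.nodup (List.nodup_range)
  have hub : ∀ i ∈ perm, i < finca.length := fun i hi => List.mem_range.mp (hp.subset hi)
  show finca.zipIdx.foldl
      (fun costo fi => costo + pvTm fi.1
        (((perm.foldl (fun (st : List Int × Int) i =>
            (st.1.set i st.2, st.2 + (finca.getD i (0, 0, 0)).2.1))
          (List.replicate finca.length (0 : Int), 0)).1).getD fi.2 0)) 0
    = pvSeqCost finca perm 0
  rw [pvBuild_eq_fold,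
    pv_foldl_add_sum (fun fi : (Int × Int × Int) × Nat =>
      pvTm fi.1 ((pvBuild finca perm (List.replicate finca.length 0) 0).getD fi.2 0)),
    pv_zipIdx_eq, List.map_map]
  have hcs : (List.range finca.length).map
      ((fun fi : (Int × Int × Int) × Nat =>
          pvTm fi.1 ((pvBuild finca perm (List.replicate finca.length 0) 0).getD fi.2 0))
        ∘ (fun j => (finca.getD j (0, 0, 0), j)))
      = (List.range finca.length).map
        (fun j => pvTm (finca.getD j (0, 0, 0))
          ((pvBuild finca perm (List.replicate finca.length 0) 0).getD j 0)) := rfl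
  rw [hcs]
  have := pvBuild_cost finca perm (List.replicate finca.length 0) 0 hnd hub (by simp)
  rw [show ((List.range finca.length).map
        (fun j => pvTm (finca.getD j (0, 0, 0))
          ((pvBuild finca perm (List.replicate finca.length 0) 0).getD j 0))).sum
      = pvCostSum finca (pvBuild finca perm (List.replicate finca.length 0) 0) from rfl, this]
  have hz : ((List.range finca.length).map
      (fun j => if j ∈ perm then 0
        else pvTm (finca.getD j (0, 0, 0)) ((List.replicate finca.length (0 : Int)).getD j 0))).sum = 0 := by
    apply List.sum_eq_zero
    intro y hy
    simp only [List.mem_map, List.mem_range] at hy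
    obtain ⟨j, hj, rfl⟩ := hy
    rw [if_pos (hp.mem_iff.mpr (List.mem_range.mpr hj))]
  rw [hz]
  ring

theorem pv_main_fold (finca : List (Int × Int × Int)) :
    ∀ (rem : List Nat) (t : Int), rem.Nodup →
    ((pvPermsLex rem).map (fun pi => (pvSeqCost finca pi t, pi))).foldl pvStep none
      = some (pvSolveB finca rem t) := by
  intro rem
  induction hn : rem.length using Nat.strong_induction_on generalizing rem with
  | _ n ih =>
    intro t hnd
    by_cases hl : rem = []
    · subst hl
      rw [pvPermsLex, dif_pos rfl, pvSolveB, dif_pos rfl]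
      rfl
    · subst hn
      -- the candidate produced by scheduling x first and continuing optimally
      set candF : {y // y ∈ rem} → (Int × List Nat) := fun x =>
        (pvPen finca x.1 t + (pvSolveB finca (rem.erase x.1) (t + pvDur finca x.1)).1,
         x.1 :: (pvSolveB finca (rem.erase x.1) (t + pvDur finca x.1)).2) with hcandF
      have hblock : ∀ (x : {y // y ∈ rem}) (acc : Option (Int × List Nat)),
          (((pvPermsLex (rem.erase x.1)).map (x.1 :: ·)).map
            (fun pi => (pvSeqCost finca pi t, pi))).foldl pvStep acc
          = pvStep acc (candF x) := by
        intro x acc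
        have hmm : ((pvPermsLex (rem.erase x.1)).map (x.1 :: ·)).map
              (fun pi => (pvSeqCost finca pi t, pi))
            = ((pvPermsLex (rem.erase x.1)).map
                (fun pi => (pvSeqCost finca pi (t + pvDur finca x.1), pi))).map
                  (pvShift (pvPen finca x.1 t) x.1) := by
          rw [List.map_map, List.map_map]
          exact List.map_congr_left (fun pi _ => rfl)
        have hlen : (rem.erase x.1).length < rem.length := by
          rw [List.length_erase_of_mem x.2]
          have : 0 < rem.length := List.length_pos_of_mem x.2
          omega
        have hIH : ((pvPermsLex (rem.erase x.1)).map
              (fun pi => (pvSeqCost finca pi (t + pvDur finca x.1), pi))).foldl pvStep none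
            = some (pvSolveB finca (rem.erase x.1) (t + pvDur finca x.1)) :=
          ih _ hlen (rem.erase x.1) rfl (t + pvDur finca x.1) (hnd.erase x.1)
        have hshift : (((pvPermsLex (rem.erase x.1)).map
              (fun pi => (pvSeqCost finca pi (t + pvDur finca x.1), pi))).map
                (pvShift (pvPen finca x.1 t) x.1)).foldl pvStep none
            = some (candF x) := by
          have h0 := foldl_pvStep_map_shift (pvPen finca x.1 t) x.1
            ((pvPermsLex (rem.erase x.1)).map
              (fun pi => (pvSeqCost finca pi (t + pvDur finca x.1), pi))) none
          rw [show (none : Option (Int × List Nat)).map (pvShift (pvPen finca x.1 t) x.1) = none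
              from rfl] at h0
          rw [h0, hIH]
          rfl
        rw [hmm]
        cases acc with
        | none => rw [hshift]; rfl
        | some b =>
          rw [foldl_pvStep_some, hshift, pvStep_some]
          rfl
      rw [pvPermsLex, dif_neg hl, List.map_flatMap, pv_foldl_flatMap,
        pv_foldl_congr _ _ (fun acc x => pvStep acc (candF x)) none
          (fun acc x _ => hblock x acc),
        ← List.foldl_map]
      obtain ⟨w, hw⟩ := foldl_pvStep_isSome (rem.attach.map candF)
        (by simp [hl])
      rw [hw, pvSolveB, dif_neg hl]
      have hB : rem.attach.foldl
          (fun (best : Option (Int × List Nat)) (i : {x // x ∈ rem}) =>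
            let f := finca.getD i.1 (0, 0, 0)
            let r := t + f.2.1 - f.1
            let pen := if r > 0 then f.2.2 * r else 0
            let sub := pvSolveB finca (rem.filter (fun j => j ≠ i.1)) (t + f.2.1)
            let c := pen + sub.1
            match best with
            | none => some (c, i.1 :: sub.2)
            | some b => if c < b.1 then some (c, i.1 :: sub.2) else some b)
          none = some w := by
        rw [pv_foldl_congr _ _ (fun acc x => pvStep acc (candF x)) none]
        · rw [← List.foldl_map]
          exact hw
        · intro acc x _
          have hfe : rem.filter (fun j => j ≠ x.1) = rem.erase x.1 := by
            have h := List.Nodup.erase_eq_filter hnd x.1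
            simpa using h.symm
          simp only [hfe]
          rfl
      rw [hB]


-- ===== VERDICT (by name: the statement is the Claim_ definition above) =====
theorem fuerza_bruta_optimo_py_spec : Claim_equal_fuerza_bruta_optimo_py := by
  intro finca _
  unfold Spec_fuerza_bruta_optimo_py
  have h1 : ∀ (l : List (List Nat)) (acc : Option (Int × List Nat)),
      l.foldl (fun best pi =>
        let c := pvRecalcCost finca pi
        match best with
        | none => some (c, pi)
        | some b => if c < b.1 then some (c, pi) else some b) acc
      = (l.map (fun pi => (pvRecalcCost finca pi, pi))).foldl pvStep acc := by
    intro l acc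
    rw [List.foldl_map]
    rfl
  have h2 : (pvPermsLex (List.range finca.length)).map
        (fun pi => (pvRecalcCost finca pi, pi))
      = (pvPermsLex (List.range finca.length)).map
        (fun pi => (pvSeqCost finca pi 0, pi)) :=
    List.map_congr_left (fun pi hpi => by
      rw [pvRecalc_eq_seq finca pi (mem_pvPermsLex _ pi hpi)])
  have hA : (pvPermsLex (List.range finca.length)).foldl
      (fun (best : Option (Int × List Nat)) pi =>
        let c := pvRecalcCost finca pi
        match best with
        | none => some (c, pi)
        | some b => if c < b.1 then some (c, pi) else some b) none
      = some (pvSolveB finca (List.range finca.length) 0) := by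
    rw [h1, h2, pv_main_fold finca (List.range finca.length) 0 (List.nodup_range)]
  show (match (pvPermsLex (List.range finca.length)).foldl
      (fun (best : Option (Int × List Nat)) pi =>
        let c := pvRecalcCost finca pi
        match best with
        | none => some (c, pi)
        | some b => if c < b.1 then some (c, pi) else some b) none with
    | some b => (b.1, b.2.map (Int.ofNat ·))
    | none => ((0 : Int), ([] : List Int)))
    = fuerza_bruta_optimo_py_alt finca
  rw [hA]
  rfl
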